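-- pv_equiv track=rewrite | github.com/Cosomazio/FakeNewsDetection | Tweet_Credibility/SPAMDetectorFeatureExtractor.py | num_of_usermention
-- ===== SOURCE A (Python) =====
-- def num_of_usermention(text):
--     text=text.split()
--     count = 0
--     for el in text:
--         if "@" in el:
--             el=el.split("@")
--             for user in el[1:]:
--                     count+=1
--     return count
-- ===== SOURCE B (Python) =====
-- def num_of_usermention(text):
--     return sum(1 for ch in text if ch == "@")
-- ===== Notes on version B (the rewrite author's own statement) =====
-- stated objective: simpler
-- what changed: B replaces the whitespace-split with nested per-word '@'-splitting by a single character scan summing 1 per '@' (every '@' survives the whitespace split and each word contributes exactly its number of '@'s).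
import Mathlib
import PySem

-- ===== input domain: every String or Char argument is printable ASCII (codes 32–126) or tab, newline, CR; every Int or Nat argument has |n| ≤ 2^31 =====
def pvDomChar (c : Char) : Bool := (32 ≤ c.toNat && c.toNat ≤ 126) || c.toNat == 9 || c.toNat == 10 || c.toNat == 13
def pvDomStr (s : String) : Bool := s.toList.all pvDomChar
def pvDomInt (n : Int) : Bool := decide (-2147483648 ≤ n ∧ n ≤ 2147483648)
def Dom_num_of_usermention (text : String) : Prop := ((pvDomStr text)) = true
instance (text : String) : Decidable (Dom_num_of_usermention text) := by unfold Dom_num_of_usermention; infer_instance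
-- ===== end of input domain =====

-- B replaces A's whitespace-split + per-word '@'-split nested loops by one character scan summing 1 per '@' (objective: simpler).
-- ===== PORT A =====
def num_of_usermention (text : String) : Int :=
  let words := PySem.Str.split₀ text
  words.foldl (fun count el =>
    if PySem.Str.isIn "@" el then
      match PySem.Str.split? el "@" with
      | some parts => (parts.drop 1).foldl (fun c _ => c + 1) count
      | none => count        -- unreachable: the separator "@" is nonempty
    else count) 0

-- ===== PORT B =====
def num_of_usermention_alt (text : String) : Int :=
  text.toList.foldl (fun acc ch => if ch == '@' then acc + 1 else acc) 0

-- ===== PRECONDITION & SPEC =====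
def Spec_num_of_usermention (text : String) (out : Int) : Prop := out = num_of_usermention_alt text
instance (text : String) (out : Int) : Decidable (Spec_num_of_usermention text out) := by unfold Spec_num_of_usermention; infer_instance

-- ===== CLAIM (what is proved, stated in full; the proofs are below) =====
def Claim_equal_num_of_usermention : Prop := ∀ (text : String), Dom_num_of_usermention text → Spec_num_of_usermention text (num_of_usermention text)

-- ===== LEMMAS AND PROOFS =====

lemma splitOn_go_at_length (fuel : Nat) :
    ∀ (l cur : List Char) (acc : List (List Char)), l.length ≤ fuel →
      (PySem.Chars.splitOn.go ['@'] fuel l cur acc).length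
        = acc.length + 1 + l.count '@' := by
  induction fuel with
  | zero =>
    intro l cur acc h
    have : l = [] := List.eq_nil_of_length_eq_zero (Nat.le_zero.mp h)
    subst this
    simp [PySem.Chars.splitOn.go]
  | succ n ih =>
    intro l cur acc h
    cases l with
    | nil => simp [PySem.Chars.splitOn.go]
    | cons c rest =>
      by_cases hc : c = '@'
      · subst hc
        have hp : List.isPrefixOf ['@'] ('@' :: rest) = true := by
          simp [List.isPrefixOf]
        rw [PySem.Chars.splitOn.go]
        simp only [hp, if_true, List.length_cons, List.length_nil, List.drop_succ_cons, List.drop_zero]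
        rw [ih rest [] _ (by simpa using Nat.le_of_succ_le_succ h)]
        simp [List.count_cons]
        omega
      · have hp : List.isPrefixOf ['@'] (c :: rest) = false := by
          simp [List.isPrefixOf]
          exact fun h => absurd h.symm hc
        rw [PySem.Chars.splitOn.go]
        simp only [hp, Bool.false_eq_true, if_false]
        rw [ih rest (c :: cur) acc (by simpa using Nat.le_of_succ_le_succ h)]
        simp [hc]

lemma splitOn_at_length (l : List Char) :
    (PySem.Chars.splitOn l ['@']).length = 1 + l.count '@' := by
  rw [PySem.Chars.splitOn, splitOn_go_at_length (l.length + 1) l [] [] (by omega)]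
  simp

lemma split₀_count (l : List Char) :
    ∀ (cur : List Char) (acc : List (List Char)),
      ((PySem.Chars.split₀.go l cur acc).map (fun w => w.count '@')).sum
        = ((acc.map (fun w => w.count '@')).sum + cur.count '@') + l.count '@' := by
  induction l with
  | nil =>
    intro cur acc
    by_cases hc : cur.isEmpty
    · simp [PySem.Chars.split₀.go, List.isEmpty_iff.mp hc, List.sum_reverse]
    · simp only [PySem.Chars.split₀.go, hc, Bool.false_eq_true, if_false]
      simp [List.sum_reverse]
      try omega
  | cons c rest ih =>
    intro cur acc
    by_cases hs : PySem.Chars.isspace c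
    · have hcnot : c ≠ '@' := by
        intro h; subst h; simp [PySem.Chars.isspace] at hs
      by_cases hc : cur.isEmpty
      · rw [PySem.Chars.split₀.go]
        simp only [hs, hc, if_true]
        rw [ih [] acc]
        simp [List.isEmpty_iff.mp hc, hcnot]
      · rw [PySem.Chars.split₀.go]
        simp only [hs, hc, if_true, Bool.false_eq_true, if_false]
        rw [ih [] (cur.reverse :: acc)]
        simp [hcnot]
        try omega
    · rw [PySem.Chars.split₀.go]
      simp only [hs, Bool.false_eq_true, if_false]
      rw [ih (c :: cur) acc]
      simp [List.count_cons]
      omega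


lemma ports_agree (text : String) : num_of_usermention text = num_of_usermention_alt text := by
  unfold num_of_usermention num_of_usermention_alt
  rw [PySem.List.foldl_beq_add_one]
  rw [PySem.Str.split₀]
  rw [List.foldl_map]
  have hbody : ∀ (c : Int), ∀ w ∈ PySem.Chars.split₀ text.toList,
      (fun count el =>
        if PySem.Str.isIn "@" el then
          match PySem.Str.split? el "@" with
          | some parts => (parts.drop 1).foldl (fun c _ => c + 1) count
          | none => count
        else count) c (String.ofList w)
      = (fun count w => count + (w.count '@' : Int)) c w := by
    intro c w _
    have htl : (String.ofList w).toList = w := by simp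
    by_cases hin : PySem.Str.isIn "@" (String.ofList w)
    · simp only [hin, if_true]
      have hsplit : PySem.Str.split? (String.ofList w) "@"
          = some ((PySem.Chars.splitOn w ['@']).map String.ofList) := by
        simp [PySem.Str.split?, PySem.Chars.split?, htl]
      rw [hsplit]
      simp only []
      rw [show (fun (c : Int) (_ : String) => c + 1) = (fun (acc : Int) x => acc + (fun _ => (1:Int)) x) from rfl,
        PySem.List.foldl_add]
      rw [List.drop_one, ← List.map_tail, PySem.List.sum_map_const_int]
      have hlen := splitOn_at_length w
      have : (PySem.Chars.splitOn w ['@']).tail.length = w.count '@' := by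
        rw [List.length_tail, hlen]; omega
      rw [List.length_map, this, mul_one]
    · simp only [hin, Bool.false_eq_true, if_false]
      have hfalse : PySem.Chars.isIn ['@'] w = false := by
        have := Bool.of_not_eq_true hin
        rw [PySem.Str.isIn, htl] at this
        simpa using this
      have hnot : '@' ∉ w := by
        intro hm
        exact (PySem.Chars.isIn_eq_false_iff _ _).mp hfalse
          ((List.singleton_infix_iff ..).mpr hm)
      simp [List.count_eq_zero.mpr hnot]
  rw [PySem.List.foldl_congr_mem _ _ _ _ hbody]
  rw [PySem.List.foldl_add]
  have := split₀_count text.toList [] []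
  simp only [List.map_nil, List.sum_nil, List.count_nil, PySem.Chars.split₀] at this ⊢
  rw [show (fun (w : List Char) => ((w.count '@' : Nat) : Int)) = (Nat.cast ∘ fun w => w.count '@') from rfl,
    ← List.map_map, ← Nat.cast_list_sum, this]
  simp

-- ===== VERDICT (by name: the statement is the Claim_ definition above) =====
theorem num_of_usermention_spec : Claim_equal_num_of_usermention := by
  intro text _
  unfold Spec_num_of_usermention
  exact ports_agree text
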